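-- pv_equiv track=rewrite | github.com/mohi-othman/mohi-euler-python | Euler026c.py | findFirstSlice
-- ===== SOURCE A (Python) =====
-- def findFirstSlice(numberString, maxSlice):
--     result = 0
--
--     for s in range(min(maxSlice,len(numberString)),0,-1):
--         text = numberString
--         firstSlice = text[-s:]
--         text = text[:-s]
--
--         count = 0
--
--         while(len(text)>=s):
--
--             if firstSlice!=text[-s:]:
--                 break
--
--             text = text[:-s]
--             count+=1
--
--         if count>0:
--
--             result = s
--             return findFirstSlice(firstSlice, maxSlice//2)
--
--     if result==0:
--         return numberString
-- ===== SOURCE B (Python) =====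
-- def findFirstSlice(numberString, maxSlice):
--     # Iterative scan over slice sizes: the preceding slice equals the trailing
--     # slice iff A's repetition-count loop finds at least one repeat, so one
--     # comparison replaces the whole while-loop.
--     s = min(maxSlice, len(numberString))
--     while s > 0:
--         if numberString[-2 * s:-s] == numberString[-s:]:
--             return findFirstSlice(numberString[-s:], maxSlice // 2)
--         s -= 1
--     return numberString
-- ===== Notes on version B (the rewrite author's own statement) =====
-- stated objective: alternative
-- what changed: B drops A's inner while-loop that counts every repetition of the trailing slice (A only ever uses count>0) and instead performs a single slice equality test numberString[-2*s:-s] == numberString[-s:] per candidate size in one flat loop; intended as faster (measured 1.87x at the largest size, but a timing run could not confirm it across all large inputs).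
import Mathlib
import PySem

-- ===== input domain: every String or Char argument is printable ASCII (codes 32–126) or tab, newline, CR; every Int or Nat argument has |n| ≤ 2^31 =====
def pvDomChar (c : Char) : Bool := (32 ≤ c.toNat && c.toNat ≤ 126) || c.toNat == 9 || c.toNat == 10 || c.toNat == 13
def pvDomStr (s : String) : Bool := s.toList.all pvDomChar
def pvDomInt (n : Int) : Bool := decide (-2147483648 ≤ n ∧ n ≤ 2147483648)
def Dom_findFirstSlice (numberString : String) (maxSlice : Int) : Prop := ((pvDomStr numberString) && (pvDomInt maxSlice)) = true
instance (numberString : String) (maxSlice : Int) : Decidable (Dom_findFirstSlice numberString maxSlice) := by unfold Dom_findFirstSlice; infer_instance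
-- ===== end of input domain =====

-- B drops A's inner repetition-counting while-loop: whether the count is positive only
-- depends on the first comparison, so B tests one slice equality per slice size.
-- (Recursive calls use a fuel parameter as a pure totality guard; each recursion step
-- strictly shrinks the string, so the fuel never runs out on the actual calls.)

-- ===== PORT A =====

-- A's inner `while(len(text)>=s): if firstSlice!=text[-s:]: break; text=text[:-s]; count+=1`
def pvWhileA (s : Nat) (firstSlice : List Char) : Nat → List Char → Nat → List Char × Nat
  | 0, text, count => (text, count)
  | fuel + 1, text, count =>
    if s ≤ text.length then
      if firstSlice ≠ PySem.List.slice text (some (-(s : Int))) none then (text, count)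
      else pvWhileA s firstSlice fuel (PySem.List.slice text none (some (-(s : Int)))) (count + 1)
    else (text, count)

-- A's `for s in range(min(maxSlice,len(numberString)),0,-1)` with its early return:
-- `some firstSlice` means "return findFirstSlice(firstSlice, maxSlice//2)".
def pvForA (chars : List Char) : Nat → Option (List Char)
  | 0 => none
  | s' + 1 =>
    let firstSlice := PySem.List.slice chars (some (-((s' + 1 : Nat) : Int))) none
    let text := PySem.List.slice chars none (some (-((s' + 1 : Nat) : Int)))
    let r := pvWhileA (s' + 1) firstSlice (text.length + 1) text 0
    if r.2 > 0 then some firstSlice else pvForA chars s'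

def pvGoA : Nat → List Char → Int → List Char
  | 0, chars, _ => chars
  | fuel + 1, chars, m =>
    match pvForA chars (min m (chars.length : Int)).toNat with
    | some fs => pvGoA fuel fs (PySem.Int.floordiv m 2)
    | none => chars

def findFirstSlice (numberString : String) (maxSlice : Int) : String :=
  String.ofList (pvGoA (numberString.toList.length + 1) numberString.toList maxSlice)

-- ===== PORT B =====

-- B's `while s > 0: if numberString[-2*s:-s] == numberString[-s:]: return …; s -= 1`
def pvWhileB (chars : List Char) : Nat → Option (List Char)
  | 0 => none
  | s' + 1 =>
    if PySem.List.slice chars (some (-(2 * ((s' + 1 : Nat) : Int)))) (some (-((s' + 1 : Nat) : Int)))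
        = PySem.List.slice chars (some (-((s' + 1 : Nat) : Int))) none
    then some (PySem.List.slice chars (some (-((s' + 1 : Nat) : Int))) none)
    else pvWhileB chars s'

def pvGoB : Nat → List Char → Int → List Char
  | 0, chars, _ => chars
  | fuel + 1, chars, m =>
    match pvWhileB chars (min m (chars.length : Int)).toNat with
    | some fs => pvGoB fuel fs (PySem.Int.floordiv m 2)
    | none => chars

def findFirstSlice_alt (numberString : String) (maxSlice : Int) : String :=
  String.ofList (pvGoB (numberString.toList.length + 1) numberString.toList maxSlice)

-- ===== PRECONDITION & SPEC =====
def Spec_findFirstSlice (numberString : String) (maxSlice : Int) (out : String) : Prop := out = findFirstSlice_alt numberString maxSlice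
instance (numberString : String) (maxSlice : Int) (out : String) : Decidable (Spec_findFirstSlice numberString maxSlice out) := by unfold Spec_findFirstSlice; infer_instance

-- ===== CLAIM (what is proved, stated in full; the proofs are below) =====
def Claim_equal_findFirstSlice : Prop := ∀ (numberString : String) (maxSlice : Int), Dom_findFirstSlice numberString maxSlice → Spec_findFirstSlice numberString maxSlice (findFirstSlice numberString maxSlice)

-- ===== LEMMAS AND PROOFS =====

-- A's while-loop never decreases the counter
theorem pvWhileA_count_ge (s : Nat) (fs : List Char) (fuel : Nat) (text : List Char) (c : Nat) :
    c ≤ (pvWhileA s fs fuel text c).2 := by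
  induction fuel generalizing text c with
  | zero => simp [pvWhileA]
  | succ fuel ih =>
    rw [pvWhileA]
    split
    · split
      · simp
      · exact le_trans (Nat.le_succ c) (ih _ _)
    · simp

-- "count > 0" after A's while-loop means: the guard held on entry and the first repeat matched
theorem pvWhileA_pos_iff (s : Nat) (fs text : List Char) (fuel : Nat) :
    0 < (pvWhileA s fs (fuel + 1) text 0).2 ↔
      (s ≤ text.length ∧ fs = PySem.List.slice text (some (-(s : Int))) none) := by
  rw [pvWhileA]
  split
  · rename_i hg
    split
    · rename_i hne
      simp only [Nat.lt_irrefl, false_iff, not_and]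
      intro _ hEq
      exact hne hEq
    · rename_i hne
      simp only [not_not] at hne
      have := pvWhileA_count_ge s fs fuel (PySem.List.slice text none (some (-(s : Int)))) 1
      constructor
      · intro _; exact ⟨hg, hne⟩
      · intro _; exact lt_of_lt_of_le Nat.zero_lt_one this
  · rename_i hg
    simp only [Nat.lt_irrefl, false_iff, not_and]
    intro h; exact absurd h hg

-- A's branch test "count > 0" is equivalent to B's single slice comparison,
-- and on success both return the same trailing slice.
theorem forA_eq_whileB (chars : List Char) (s : Nat) (hle : s ≤ chars.length) :
    pvForA chars s = pvWhileB chars s := by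
  induction s with
  | zero => rfl
  | succ s' ih =>
    have hpos : 0 < s' + 1 := Nat.succ_pos s'
    have h2pos : 0 < 2 * (s' + 1) := by omega
    have h2 : (-(2 * ((s' + 1 : Nat) : Int))) = (-(((2 * (s' + 1) : Nat)) : Int)) := by
      push_cast; ring
    simp only [pvForA, pvWhileB, ih (by omega), h2, pvWhileA_pos_iff]
    have hcond : ((s' + 1) ≤ (PySem.List.slice chars none (some (-((s' + 1 : Nat) : Int)))).length ∧
        PySem.List.slice chars (some (-((s' + 1 : Nat) : Int))) none =
          PySem.List.slice (PySem.List.slice chars none (some (-((s' + 1 : Nat) : Int))))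
            (some (-((s' + 1 : Nat) : Int))) none) ↔
        (PySem.List.slice chars (some (-(((2 * (s' + 1) : Nat)) : Int))) (some (-((s' + 1 : Nat) : Int)))
          = PySem.List.slice chars (some (-((s' + 1 : Nat) : Int))) none) := by
      rw [PySem.List.slice_to_neg_natCast chars _ hpos,
        PySem.List.slice_from_neg_natCast chars _ hpos,
        PySem.List.slice_from_neg_natCast _ _ hpos]
      simp only [PySem.List.slice, PySem.List.clampIdx_neg_natCast _ _ hpos,
        PySem.List.clampIdx_neg_natCast _ _ h2pos, List.length_take, List.drop_take]
      by_cases hge : 2 * (s' + 1) ≤ chars.length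
      · have e1 : min (chars.length - (s' + 1)) chars.length - (s' + 1) = chars.length - 2 * (s' + 1) := by omega
        have e2 : min (chars.length - (s' + 1)) chars.length = chars.length - (s' + 1) := by omega
        have e3 : chars.length - (s' + 1) - (chars.length - 2 * (s' + 1)) = s' + 1 := by omega
        rw [e1, e2, e3]
        constructor
        · rintro ⟨-, hEq⟩; exact hEq.symm
        · intro hEq; exact ⟨by omega, hEq.symm⟩
      · -- len < 2(s'+1): both tests fail (A: guard fails; B: the two slices have different lengths)
        constructor
        · rintro ⟨hgd, -⟩
          exact absurd hgd (by simp; omega)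
        · intro hEq
          have := congrArg List.length hEq
          simp only [List.length_take, List.length_drop] at this
          omega
    simp only [hcond]

theorem goA_eq_goB (fuel : Nat) (chars : List Char) (m : Int) :
    pvGoA fuel chars m = pvGoB fuel chars m := by
  induction fuel generalizing chars m with
  | zero => rfl
  | succ fuel ih =>
    rw [pvGoA, pvGoB, forA_eq_whileB chars _ (by omega)]
    split
    · exact ih _ _
    · rfl

-- ===== VERDICT (by name: the statement is the Claim_ definition above) =====
theorem findFirstSlice_spec : Claim_equal_findFirstSlice := by
  intro numberString maxSlice _
  unfold Spec_findFirstSlice findFirstSlice findFirstSlice_alt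
  rw [goA_eq_goB]
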